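-- pv_equiv track=rewrite | github.com/gray247/black-skies | services/src/blackskies/services/long_form.py | _meta_summary_detected
-- ===== SOURCE A (Python) =====
-- def _meta_summary_detected(text: str) -> bool:
--     lowered = text.lower()
--     markers = ["summary:", "outline:", "beats:", "scene title:", "chapter:"]
--     if any(marker in lowered for marker in markers):
--         return True
--     list_lines = [line for line in text.splitlines() if line.strip().startswith(("-", "*"))]
--     if list_lines and len(list_lines) >= max(2, len(text.splitlines()) // 2):
--         return True
--     return False
-- ===== SOURCE B (Python) =====
-- def _meta_summary_detected(text: str) -> bool:
--     markers = ("summary:", "outline:", "beats:", "scene title:", "chapter:")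
--     marker_found = False
--     bullets = 0
--     total = 0
--     for line in text.splitlines():
--         total += 1
--         low = line.lower()
--         if any(m in low for m in markers):
--             marker_found = True
--         if line.strip().startswith(("-", "*")):
--             bullets += 1
--     if marker_found:
--         return True
--     return bullets > 0 and bullets >= max(2, total // 2)
-- ===== Notes on version B (the rewrite author's own statement) =====
-- stated objective: alternative
-- what changed: B makes a single pass over text.splitlines(), lowercasing and marker-checking each line individually while simultaneously counting list lines and total lines, instead of A's whole-text lowered substring search followed by a list comprehension and a second splitlines() call; the equivalence rests on the proved fact that the markers contain no line-break characters, so a whole-text occurrence is always a within-one-line occurrence.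
import Mathlib
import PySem

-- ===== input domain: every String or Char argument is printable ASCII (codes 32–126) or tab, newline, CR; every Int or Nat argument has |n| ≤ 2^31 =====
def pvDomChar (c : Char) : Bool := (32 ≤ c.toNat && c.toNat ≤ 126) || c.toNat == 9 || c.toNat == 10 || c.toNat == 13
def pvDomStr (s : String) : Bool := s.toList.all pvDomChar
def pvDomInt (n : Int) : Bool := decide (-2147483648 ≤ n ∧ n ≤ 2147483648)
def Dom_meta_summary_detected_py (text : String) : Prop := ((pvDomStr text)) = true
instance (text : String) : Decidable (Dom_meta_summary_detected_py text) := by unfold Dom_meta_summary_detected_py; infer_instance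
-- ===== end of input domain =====

-- B replaces A's whole-text marker search plus a separate list-line comprehension and a
-- second splitlines() call by a single pass over the lines that lowercases and checks
-- the markers per line while counting list lines and total lines (objective: alternative).


-- ===== PORT A =====
def pvAMarkers : List String := ["summary:", "outline:", "beats:", "scene title:", "chapter:"]

-- line.strip().startswith(("-", "*"))
def pvIsListLine (line : String) : Bool :=
  PySem.Str.startswith (PySem.Str.strip line) "-" || PySem.Str.startswith (PySem.Str.strip line) "*"

def meta_summary_detected_py (text : String) : Bool :=
  let lowered := PySem.Str.lower text
  if pvAMarkers.any (fun m => PySem.Str.isIn m lowered) then true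
  else
    let list_lines := (PySem.Str.splitlines text).filter pvIsListLine
    if !list_lines.isEmpty && decide (list_lines.length ≥ max 2 ((PySem.Str.splitlines text).length / 2)) then
      true
    else false

-- ===== PORT B =====
-- loop body of B: total += 1; low = line.lower(); OR the marker flag; count list lines
def pvBStep (st : Bool × Nat × Nat) (line : String) : Bool × Nat × Nat :=
  let total := st.2.2 + 1
  let low := PySem.Str.lower line
  let mk := if pvAMarkers.any (fun m => PySem.Str.isIn m low) then true else st.1
  let bl := if pvIsListLine line then st.2.1 + 1 else st.2.1
  (mk, bl, total)

def meta_summary_detected_py_alt (text : String) : Bool :=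
  let st := (PySem.Str.splitlines text).foldl pvBStep (false, 0, 0)
  if st.1 then true
  else decide (0 < st.2.1 ∧ st.2.1 ≥ max 2 (st.2.2 / 2))

-- ===== PRECONDITION & SPEC =====
def Spec_meta_summary_detected_py (text : String) (out : Bool) : Prop := out = meta_summary_detected_py_alt text
instance (text : String) (out : Bool) : Decidable (Spec_meta_summary_detected_py text out) := by unfold Spec_meta_summary_detected_py; infer_instance

-- ===== CLAIM (what is proved, stated in full; the proofs are below) =====
def Claim_equal_meta_summary_detected_py : Prop := ∀ (text : String), Dom_meta_summary_detected_py text → Spec_meta_summary_detected_py text (meta_summary_detected_py text)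

-- ===== LEMMAS AND PROOFS =====

def pvIsB (c : Char) : Bool :=
  decide (c.toNat = 10) || decide (c.toNat = 13) || decide (c.toNat = 11) || decide (c.toNat = 12) ||
    decide (c.toNat = 28) || decide (c.toNat = 29) || decide (c.toNat = 30) ||
    decide (c.toNat = 133) || decide (c.toNat = 8232) || decide (c.toNat = 8233)

theorem pv_splitlines_eq (s : List Char) :
    PySem.Chars.splitlines s = PySem.Chars.splitlines.go pvIsB s [] [] := rfl

-- the accumulator of splitlines.go factors out
theorem pv_go_acc (isB : Char → Bool) :
    ∀ (n : Nat) (s : List Char), s.length ≤ n → ∀ cur acc,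
      PySem.Chars.splitlines.go isB s cur acc =
        acc.reverse ++ PySem.Chars.splitlines.go isB s cur [] := by
  intro n
  induction n with
  | zero =>
    intro s hs cur acc
    have : s = [] := by cases s <;> simp_all
    subst this
    simp [PySem.Chars.splitlines.go]
    split <;> simp
  | succ n ih =>
    intro s hs cur acc
    cases s with
    | nil => simp [PySem.Chars.splitlines.go]; split <;> simp
    | cons c rest =>
      by_cases hcr : c = '\r' ∧ ∃ r, rest = '\n' :: r
      · obtain ⟨rfl, r, rfl⟩ := hcr
        rw [PySem.Chars.splitlines.go.eq_2, PySem.Chars.splitlines.go.eq_2,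
          ih r (by simp at hs; omega) [] (cur.reverse :: acc),
          ih r (by simp at hs; omega) [] [cur.reverse]]
        simp
      · have h3 : ∀ (r : List Char), c = '\r' → rest = '\n' :: r → False := by
          intro r h1 h2; exact hcr ⟨h1, r, h2⟩
        rw [PySem.Chars.splitlines.go.eq_3 _ _ _ _ _ h3, PySem.Chars.splitlines.go.eq_3 _ _ _ _ _ h3]
        by_cases hb : isB c = true
        · simp only [hb, if_true]
          rw [ih rest (by simp at hs; omega) [] (cur.reverse :: acc),
            ih rest (by simp at hs; omega) [] [cur.reverse]]
          simp
        · simp only [hb, if_false, Bool.false_eq_true]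
          exact ih rest (by simp at hs; omega) (c :: cur) acc

-- a break-free prefix just accumulates into cur
theorem pv_go_prefix :
    ∀ (a : List Char), (∀ c ∈ a, pvIsB c = false) → ∀ r cur acc,
      PySem.Chars.splitlines.go pvIsB (a ++ r) cur acc =
        PySem.Chars.splitlines.go pvIsB r (a.reverse ++ cur) acc := by
  intro a
  induction a with
  | nil => intro _ r cur acc; simp
  | cons c a ih =>
    intro h r cur acc
    have hc : pvIsB c = false := h c (by simp)
    have h3 : ∀ (r' : List Char), c = '\r' → a ++ r = '\n' :: r' → False := by
      intro r' h1 h2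
      subst h1
      simp [pvIsB] at hc
    rw [List.cons_append, PySem.Chars.splitlines.go.eq_3 _ _ _ _ _ h3, hc]
    simp only [Bool.false_eq_true, if_false]
    rw [ih (fun x hx => h x (by simp [hx])) r (c :: cur) acc]
    simp

-- splitlines of a break-free string
theorem pv_splitlines_nobreak (s : List Char) (h : ∀ c ∈ s, pvIsB c = false) :
    PySem.Chars.splitlines s = if s = [] then [] else [s] := by
  rw [pv_splitlines_eq]
  have := pv_go_prefix s h [] [] []
  simp at this
  rw [this]
  cases s with
  | nil => simp [PySem.Chars.splitlines.go]
  | cons c t => simp [PySem.Chars.splitlines.go]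

-- splitlines splits off the first line at the first break char (general single break)
theorem pv_splitlines_break (a t : List Char) (b : Char)
    (ha : ∀ c ∈ a, pvIsB c = false) (hb : pvIsB b = true)
    (hnot : ¬ (b = '\r' ∧ ∃ r, t = '\n' :: r)) :
    PySem.Chars.splitlines (a ++ b :: t) = a :: PySem.Chars.splitlines t := by
  rw [pv_splitlines_eq, pv_go_prefix a ha (b :: t) [] []]
  have h3 : ∀ (r : List Char), b = '\r' → t = '\n' :: r → False := by
    intro r h1 h2; exact hnot ⟨h1, r, h2⟩
  rw [PySem.Chars.splitlines.go.eq_3 _ _ _ _ _ h3, hb]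
  simp only [if_true]
  rw [pv_go_acc pvIsB t.length t le_rfl [] _]
  simp [pv_splitlines_eq]

theorem pv_splitlines_break_crlf (a t : List Char)
    (ha : ∀ c ∈ a, pvIsB c = false) :
    PySem.Chars.splitlines (a ++ '\r' :: '\n' :: t) = a :: PySem.Chars.splitlines t := by
  rw [pv_splitlines_eq, pv_go_prefix a ha ('\r' :: '\n' :: t) [] []]
  rw [PySem.Chars.splitlines.go.eq_2]
  rw [pv_go_acc pvIsB t.length t le_rfl [] _]
  simp [pv_splitlines_eq]

-- a prefix cannot cross an excluded character
theorem pv_prefix_split (sub a t : List Char) (b : Char) (hb : b ∉ sub) :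
    sub <+: (a ++ b :: t) ↔ sub <+: a := by
  constructor
  · intro h
    rcases List.prefix_or_prefix_of_prefix h (List.prefix_append a (b :: t)) with h1 | h1
    · exact h1
    · obtain ⟨d, rfl⟩ := h1
      have hd : d <+: b :: t := (List.prefix_append_right_inj a).mp h
      cases d with
      | nil => simp
      | cons x xs =>
        obtain ⟨dd, hdd⟩ := hd
        simp only [List.cons_append, List.cons.injEq] at hdd
        obtain ⟨rfl, -⟩ := hdd
        exact absurd (by simp : x ∈ a ++ x :: xs) hb
  · intro h
    exact h.trans (List.prefix_append a (b :: t))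

-- an infix avoiding b lies entirely left or right of it
theorem pv_infix_split (sub a t : List Char) (b : Char) (hb : b ∉ sub) :
    sub <:+: (a ++ b :: t) ↔ sub <:+: a ∨ sub <:+: t := by
  induction a with
  | nil =>
    simp only [List.nil_append, List.infix_cons_iff]
    constructor
    · rintro (h | h)
      · have h0 := (pv_prefix_split sub [] t b hb)
        simp only [List.nil_append] at h0
        have : sub = [] := List.prefix_nil.mp (h0.mp h)
        subst this; exact Or.inl List.nil_infix
      · exact Or.inr h
    · rintro (h | h)
      · have : sub = [] := List.eq_nil_of_infix_nil h
        subst this; exact Or.inl List.nil_prefix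
      · exact Or.inr h
  | cons c a ih =>
    rw [List.cons_append, List.infix_cons_iff, List.infix_cons_iff, ih]
    constructor
    · rintro (h | h)
      · left; left
        exact (pv_prefix_split sub (c :: a) t b hb).mp (by simpa using h)
      · tauto
    · rintro ((h | h) | h)
      · left
        have h2 := (pv_prefix_split sub (c :: a) t b hb).mpr h
        simpa using h2
      · tauto
      · tauto

-- head of dropWhile fails the predicate
theorem pv_dropWhile_head {α : Type} (p : α → Bool) :
    ∀ (l : List α) (b : α) (t : List α), l.dropWhile p = b :: t → p b = false := by
  intro l
  induction l with
  | nil => intro b t h; simp [List.dropWhile] at h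
  | cons c l ih =>
    intro b t h
    by_cases hc : p c
    · rw [List.dropWhile_cons_of_pos hc] at h
      exact ih b t h
    · rw [List.dropWhile_cons_of_neg hc] at h
      injection h with h1 _
      subst h1
      simpa using hc

-- a break-free pattern occurs in s iff it occurs in one of its lines
theorem pv_main (sub : List Char) (hne : sub ≠ []) (hs : ∀ c ∈ sub, pvIsB c = false) :
    ∀ (n : Nat) (s : List Char), s.length ≤ n →
      (sub <:+: s ↔ ∃ l ∈ PySem.Chars.splitlines s, sub <:+: l) := by
  intro n
  induction n with
  | zero =>
    intro s h
    have : s = [] := by cases s <;> simp_all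
    subst this
    rw [pv_splitlines_nobreak [] (by simp)]
    constructor
    · intro h'; exact absurd (List.eq_nil_of_infix_nil h') hne
    · rintro ⟨l, hl, -⟩; simp at hl
  | succ n ih =>
    intro s hlen
    set a := s.takeWhile (fun c => !pvIsB c) with ha
    set r := s.dropWhile (fun c => !pvIsB c) with hr
    have hsplit : a ++ r = s := List.takeWhile_append_dropWhile
    have hafree : ∀ c ∈ a, pvIsB c = false := by
      intro c hc
      have := List.mem_takeWhile_imp hc
      simpa using this
    cases hrc : r with
    | nil =>
      have hsfree : ∀ c ∈ s, pvIsB c = false := by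
        rw [← hsplit, hrc]; simpa using hafree
      rw [pv_splitlines_nobreak s hsfree]
      by_cases hnil : s = []
      · subst hnil
        constructor
        · intro h'; exact absurd (List.eq_nil_of_infix_nil h') hne
        · rintro ⟨l, hl, -⟩; simp at hl
      · simp [hnil]
    | cons b t =>
      have hb : pvIsB b = true := by
        have hd : s.dropWhile (fun c => !pvIsB c) = b :: t := by rw [← hr, hrc]
        have := pv_dropWhile_head (fun c => !pvIsB c) s b t hd
        simpa using this
      have hbs : b ∉ sub := fun hmem => by rw [hs b hmem] at hb; cases hb
      by_cases hcr : b = '\r' ∧ ∃ r', t = '\n' :: r'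
      · obtain ⟨rfl, r', rfl⟩ := hcr
        have hns : ('\n' : Char) ∉ sub := fun hmem => by
          have := hs _ hmem; simp [pvIsB] at this
        have heq : s = a ++ '\r' :: '\n' :: r' := by rw [← hsplit, hrc]
        have hlr : r'.length ≤ n := by
          have : s.length = a.length + 2 + r'.length := by rw [heq]; simp; omega
          omega
        have h2 := pv_infix_split sub [] r' '\n' hns
        simp only [List.nil_append] at h2
        rw [heq, pv_splitlines_break_crlf a r' hafree,
          pv_infix_split sub a ('\n' :: r') '\r' hbs, h2, ih r' hlr]
        constructor
        · rintro (h | (h | h))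
          · exact ⟨a, by simp, h⟩
          · exact absurd (List.eq_nil_of_infix_nil h) hne
          · obtain ⟨l, hl, hsub⟩ := h
            exact ⟨l, by simp [hl], hsub⟩
        · rintro ⟨l, hl, hsub⟩
          simp only [List.mem_cons] at hl
          rcases hl with rfl | hl
          · exact Or.inl hsub
          · exact Or.inr (Or.inr ⟨l, hl, hsub⟩)
      · have heq : s = a ++ b :: t := by rw [← hsplit, hrc]
        have hlr : t.length ≤ n := by
          have : s.length = a.length + 1 + t.length := by rw [heq]; simp; omega
          omega
        rw [heq, pv_splitlines_break a t b hafree hb hcr,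
          pv_infix_split sub a t b hbs, ih t hlr]
        constructor
        · rintro (h | h)
          · exact ⟨a, by simp, h⟩
          · obtain ⟨l, hl, hsub⟩ := h
            exact ⟨l, by simp [hl], hsub⟩
        · rintro ⟨l, hl, hsub⟩
          simp only [List.mem_cons] at hl
          rcases hl with rfl | hl
          · exact Or.inl hsub
          · exact Or.inr ⟨l, hl, hsub⟩

-- characters in the letter ranges are not line breaks
theorem pv_break_range (x : Char)
    (h : 65 ≤ x.toNat ∧ x.toNat ≤ 90 ∨ 97 ≤ x.toNat ∧ x.toNat ≤ 122) : pvIsB x = false := by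
  simp only [pvIsB, Bool.or_eq_false_iff, decide_eq_false_iff_not]
  omega

-- lowering a character neither creates nor destroys a line break
theorem pv_isB_lower (c : Char) : pvIsB (PySem.Chars.lowerChar c) = pvIsB c := by
  unfold PySem.Chars.lowerChar
  by_cases h : PySem.Chars.isupper c = true
  · rw [if_pos h]
    unfold PySem.Chars.isupper at h
    rw [Bool.and_eq_true, decide_eq_true_eq, decide_eq_true_eq] at h
    have h65 : 65 ≤ c.toNat := h.1
    have h90 : c.toNat ≤ 90 := h.2
    have hv : (c.toNat + 32).isValidChar := by left; omega
    have ht : (Char.ofNat (c.toNat + 32)).toNat = c.toNat + 32 := by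
      rw [Char.ofNat, dif_pos hv]; rfl
    rw [pv_break_range _ (Or.inr ⟨by rw [ht]; omega, by rw [ht]; omega⟩),
      pv_break_range c (Or.inl ⟨h65, h90⟩)]
  · rw [if_neg h]

-- lowering maps no character onto a line break it was not already
theorem pv_lower_fix (c d : Char) (hd : pvIsB d = true)
    (h : PySem.Chars.lowerChar c = d) : c = d := by
  by_cases hu : PySem.Chars.isupper c = true
  · exfalso
    have h1 : pvIsB c = false := by
      unfold PySem.Chars.isupper at hu
      rw [Bool.and_eq_true, decide_eq_true_eq, decide_eq_true_eq] at hu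
      exact pv_break_range c (Or.inl ⟨hu.1, hu.2⟩)
    have h2 := pv_isB_lower c
    rw [h, h1, hd] at h2
    cases h2
  · unfold PySem.Chars.lowerChar at h
    rw [if_neg hu] at h
    exact h

-- splitlines.go commutes with per-character lowering
theorem pv_go_map :
    ∀ (n : Nat) (s : List Char), s.length ≤ n → ∀ cur acc,
      PySem.Chars.splitlines.go pvIsB (s.map PySem.Chars.lowerChar)
          (cur.map PySem.Chars.lowerChar) (acc.map (List.map PySem.Chars.lowerChar)) =
        (PySem.Chars.splitlines.go pvIsB s cur acc).map (List.map PySem.Chars.lowerChar) := by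
  intro n
  induction n with
  | zero =>
    intro s hs cur acc
    have : s = [] := by cases s <;> simp_all
    subst this
    simp only [List.map_nil, PySem.Chars.splitlines.go]
    by_cases h : cur = [] <;> simp [h]
  | succ n ih =>
    intro s hs cur acc
    cases s with
    | nil =>
      simp only [List.map_nil, PySem.Chars.splitlines.go]
      by_cases h : cur = [] <;> simp [h]
    | cons c rest =>
      by_cases hcr : c = '\r' ∧ ∃ r, rest = '\n' :: r
      · obtain ⟨rfl, r, rfl⟩ := hcr
        have hmap : (('\r' :: '\n' :: r).map PySem.Chars.lowerChar) =
            '\r' :: '\n' :: (r.map PySem.Chars.lowerChar) := by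
          simp [PySem.Chars.lowerChar, PySem.Chars.isupper]
        rw [hmap, PySem.Chars.splitlines.go.eq_2, PySem.Chars.splitlines.go.eq_2]
        have := ih r (by simp at hs; omega) [] (cur.reverse :: acc)
        simpa using this
      · have h3 : ∀ (r : List Char), c = '\r' → rest = '\n' :: r → False := by
          intro r h1 h2; exact hcr ⟨h1, r, h2⟩
        have h3' : ∀ (r : List Char), PySem.Chars.lowerChar c = '\r' →
            rest.map PySem.Chars.lowerChar = '\n' :: r → False := by
          intro r h1 h2
          have hc : c = '\r' := pv_lower_fix c '\r' (by decide) h1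
          cases rest with
          | nil => simp at h2
          | cons x xs =>
            simp only [List.map_cons, List.cons.injEq] at h2
            have hx : x = '\n' := pv_lower_fix x '\n' (by decide) h2.1
            exact h3 xs hc (by rw [hx])
        rw [List.map_cons, PySem.Chars.splitlines.go.eq_3 _ _ _ _ _ h3',
          PySem.Chars.splitlines.go.eq_3 _ _ _ _ _ h3, pv_isB_lower]
        by_cases hb : pvIsB c = true
        · rw [hb]
          simp only [if_true]
          have := ih rest (by simp at hs; omega) [] (cur.reverse :: acc)
          simpa using this
        · rw [Bool.not_eq_true] at hb
          rw [hb]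
          simp only [Bool.false_eq_true, if_false]
          have := ih rest (by simp at hs; omega) (c :: cur) acc
          simpa using this

-- splitlines commutes with lower
theorem pv_splitlines_lower (s : List Char) :
    PySem.Chars.splitlines (PySem.Chars.lower s) =
      (PySem.Chars.splitlines s).map PySem.Chars.lower := by
  have := pv_go_map s.length s le_rfl [] []
  simpa [pv_splitlines_eq, PySem.Chars.lower] using this

-- a line-break-free marker occurs in the lowered text iff it occurs in some lowered line
theorem pv_marker_line (m text : String) (hne : m.toList ≠ [])
    (hfreeB : (m.toList.all (fun c => !pvIsB c)) = true) :
    PySem.Str.isIn m (PySem.Str.lower text) =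
      (PySem.Str.splitlines text).any (fun l => PySem.Str.isIn m (PySem.Str.lower l)) := by
  have hfree : ∀ c ∈ m.toList, pvIsB c = false := by
    intro c hc
    have := List.all_eq_true.mp hfreeB c hc
    simpa using this
  rw [Bool.eq_iff_iff, PySem.Str.isIn_iff_infix, List.any_eq_true]
  rw [PySem.Str.toList_lower,
    pv_main m.toList hne hfree (PySem.Chars.lower text.toList).length _ le_rfl,
    pv_splitlines_lower]
  constructor
  · rintro ⟨l, hl, hsub⟩
    rw [List.mem_map] at hl
    obtain ⟨l0, hl0, rfl⟩ := hl
    have : l0 ∈ List.map String.toList (PySem.Str.splitlines text) := by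
      rw [PySem.Str.splitlines_map_toList]; exact hl0
    rw [List.mem_map] at this
    obtain ⟨L, hL, rfl⟩ := this
    refine ⟨L, hL, ?_⟩
    rw [PySem.Str.isIn_iff_infix, PySem.Str.toList_lower]
    exact hsub
  · rintro ⟨L, hL, hsub⟩
    rw [PySem.Str.isIn_iff_infix, PySem.Str.toList_lower] at hsub
    refine ⟨PySem.Chars.lower L.toList, ?_, hsub⟩
    rw [List.mem_map]
    refine ⟨L.toList, ?_, rfl⟩
    rw [← PySem.Str.splitlines_map_toList, List.mem_map]
    exact ⟨L, hL, rfl⟩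

-- B's one fold is three independent accumulators
theorem pv_fold_step (lines : List String) :
    ∀ (b : Bool) (k t : Nat),
      lines.foldl pvBStep (b, k, t) =
        (b || lines.any (fun l => pvAMarkers.any (fun m => PySem.Str.isIn m (PySem.Str.lower l))),
         k + lines.countP pvIsListLine, t + lines.length) := by
  induction lines with
  | nil => intro b k t; simp
  | cons x xs ih =>
    intro b k t
    simp only [List.foldl_cons, List.any_cons, List.countP_cons, List.length_cons, pvBStep]
    rw [ih]
    simp only [Prod.mk.injEq]
    refine ⟨?_, ?_, ?_⟩
    · cases hx : pvAMarkers.any (fun m => PySem.Str.isIn m (PySem.Str.lower x)) with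
      | true => simp
      | false => simp
    · split_ifs <;> omega
    · omega

theorem pv_fold_split (lines : List String) :
    lines.foldl pvBStep (false, 0, 0) =
      (lines.any (fun l => pvAMarkers.any (fun m => PySem.Str.isIn m (PySem.Str.lower l))),
       lines.countP pvIsListLine, lines.length) := by
  rw [pv_fold_step]
  simp

-- the whole-text marker scan equals the per-line scan
set_option maxRecDepth 20000 in
theorem pv_any_markers (text : String) :
    pvAMarkers.any (fun m => PySem.Str.isIn m (PySem.Str.lower text)) =
      (PySem.Str.splitlines text).any
        (fun l => pvAMarkers.any (fun m => PySem.Str.isIn m (PySem.Str.lower l))) := by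
  simp only [pvAMarkers, List.any_cons, List.any_nil, Bool.or_false]
  rw [pv_marker_line "summary:" text (by decide) (by decide),
    pv_marker_line "outline:" text (by decide) (by decide),
    pv_marker_line "beats:" text (by decide) (by decide),
    pv_marker_line "scene title:" text (by decide) (by decide),
    pv_marker_line "chapter:" text (by decide) (by decide)]
  rw [Bool.eq_iff_iff]
  simp only [Bool.or_eq_true, List.any_eq_true]
  constructor
  · rintro (h1 | h1 | h1 | h1 | h1) <;>
      · obtain ⟨l, hl, h⟩ := h1
        refine ⟨l, hl, ?_⟩
        simp at h ⊢
        tauto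
  · rintro ⟨l, hl, h⟩
    rcases h with (h | h | h | h | h)
    · exact Or.inl ⟨l, hl, h⟩
    · exact Or.inr (Or.inl ⟨l, hl, h⟩)
    · exact Or.inr (Or.inr (Or.inl ⟨l, hl, h⟩))
    · exact Or.inr (Or.inr (Or.inr (Or.inl ⟨l, hl, h⟩)))
    · exact Or.inr (Or.inr (Or.inr (Or.inr ⟨l, hl, h⟩)))

-- the two tails agree
theorem pv_equiv (text : String) :
    meta_summary_detected_py text = meta_summary_detected_py_alt text := by
  simp only [meta_summary_detected_py, meta_summary_detected_py_alt, pv_fold_split]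
  rw [pv_any_markers text]
  by_cases hm : (PySem.Str.splitlines text).any
      (fun l => pvAMarkers.any (fun m => PySem.Str.isIn m (PySem.Str.lower l))) = true
  · rw [hm]; simp
  · rw [Bool.not_eq_true] at hm
    rw [hm]
    simp only [Bool.false_eq_true, if_false]
    have hgen : ∀ (c d : Bool), (c = true ↔ d = true) → (if c = true then true else false) = d := by
      intro c d h; cases c <;> cases d <;> simp_all
    apply hgen
    have hc : List.countP pvIsListLine (PySem.Str.splitlines text) =
        ((PySem.Str.splitlines text).filter pvIsListLine).length :=
      List.countP_eq_length_filter
    rw [Bool.and_eq_true]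
    simp only [Bool.not_eq_true', List.isEmpty_eq_false_iff, decide_eq_true_eq, hc]
    constructor
    · rintro ⟨h1, h2⟩
      have : 0 < ((PySem.Str.splitlines text).filter pvIsListLine).length :=
        List.length_pos_of_ne_nil h1
      exact ⟨this, h2⟩
    · rintro ⟨h1, h2⟩
      exact ⟨List.ne_nil_of_length_pos h1, h2⟩

-- ===== VERDICT (by name: the statement is the Claim_ definition above) =====
theorem meta_summary_detected_py_spec : Claim_equal_meta_summary_detected_py := by
  intro text _
  exact pv_equiv text
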